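-- pv_equiv track=rewrite | github.com/nishadg246/competition | w5/p2.py | calc
-- ===== SOURCE A (Python) =====
-- def calc(rooms,ma,m):
-- 	s=m
-- 	month=0
-- 	x=rooms
-- 	while x!=[] and month<ma:
-- 		if s>=x[0]:
-- 			s-=x[0]
-- 			x=x[1:]
-- 		else:
-- 			month+=1
-- 			if(month!=ma):
-- 				s+=m
-- 	return (len(rooms)-len(x),s)
-- ===== SOURCE B (Python) =====
-- def calc(rooms, ma, m):
--     s = m
--     if ma <= 0:
--         return (0, s)
--     month = 0
--     bought = 0
--     for c in rooms:
--         if s < c: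
--             rem = ma - month - 1  # paydays still to come before the deadline
--             if m <= 0 or (c - s + m - 1) // m > rem:
--                 # can never afford this room: idle through all remaining months
--                 return (bought, s + rem * m)
--             t = (c - s + m - 1) // m  # months needed to afford room c
--             month += t
--             s += t * m
--         s -= c
--         bought += 1
--     return (bought, s)
-- ===== Notes on version B (the rewrite author's own statement) =====
-- stated objective: faster
-- what changed: B walks the room list once with an index instead of re-slicing x=x[1:] each purchase, and replaces the one-month-at-a-time saving loop by a single ceiling-division computing how many months are needed to afford the next room.
import Mathlib
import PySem

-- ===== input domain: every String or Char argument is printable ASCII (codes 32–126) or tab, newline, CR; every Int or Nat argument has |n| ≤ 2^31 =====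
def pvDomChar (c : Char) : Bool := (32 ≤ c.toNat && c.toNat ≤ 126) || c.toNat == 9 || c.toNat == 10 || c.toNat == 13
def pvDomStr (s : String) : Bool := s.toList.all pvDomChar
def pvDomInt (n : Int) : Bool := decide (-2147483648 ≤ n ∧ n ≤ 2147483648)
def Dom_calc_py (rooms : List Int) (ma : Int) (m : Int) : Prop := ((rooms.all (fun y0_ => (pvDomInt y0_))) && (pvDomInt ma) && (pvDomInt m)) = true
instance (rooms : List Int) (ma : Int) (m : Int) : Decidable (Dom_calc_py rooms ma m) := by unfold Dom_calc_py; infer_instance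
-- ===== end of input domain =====

-- B is a one-pass re-implementation: it never slices the list and it skips all idle
-- months at once with a ceiling division; the Python tuple result is encoded as [count, s].

-- ===== PORT A =====
-- while x!=[] and month<ma: if s>=x[0]: s-=x[0]; x=x[1:]  else: month+=1; if month!=ma: s+=m
def calcA_loop (ma mm : Int) (x : List Int) (month s : Int) : List Int × Int :=
  match x with
  | [] => ([], s)
  | c :: rest =>
    if month < ma then
      if s ≥ c then
        calcA_loop ma mm rest month (s - c)
      else
        if month + 1 ≠ ma then
          calcA_loop ma mm (c :: rest) (month + 1) (s + mm)
        else
          (c :: rest, s)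
    else
      (c :: rest, s)
termination_by ((ma - month).toNat, x.length)
decreasing_by
  · exact Prod.Lex.right _ (by simp)
  · exact Prod.Lex.left _ _ (by omega)

def calc_py (rooms : List Int) (ma : Int) (m : Int) : List Int :=
  let s := m
  let month := 0
  let x := rooms
  let r := calcA_loop ma m x month s
  [(rooms.length : Int) - (r.1.length : Int), r.2]

-- ===== PORT B =====
-- for c in rooms: if s<c: rem=ma-month-1; if m<=0 or (c-s+m-1)//m>rem: return (bought, s+rem*m)
--                 else: t=(c-s+m-1)//m; month+=t; s+=t*m;  then s-=c; bought+=1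
def calcB_loop (ma mm : Int) (x : List Int) (month s bought : Int) : Int × Int :=
  match x with
  | [] => (bought, s)
  | c :: rest =>
    if s < c then
      let rem := ma - month - 1
      let t := PySem.Int.floordiv (c - s + mm - 1) mm
      if mm ≤ 0 ∨ t > rem then
        (bought, s + rem * mm)
      else
        calcB_loop ma mm rest (month + t) (s + t * mm - c) (bought + 1)
    else
      calcB_loop ma mm rest month (s - c) (bought + 1)

def calc_py_alt (rooms : List Int) (ma : Int) (m : Int) : List Int :=
  let s := m
  if ma ≤ 0 then [0, s]
  else
    let r := calcB_loop ma m rooms 0 s 0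
    [r.1, r.2]

-- ===== PRECONDITION & SPEC =====
def Spec_calc_py (rooms : List Int) (ma : Int) (m : Int) (out : List Int) : Prop := out = calc_py_alt rooms ma m
instance (rooms : List Int) (ma : Int) (m : Int) (out : List Int) : Decidable (Spec_calc_py rooms ma m out) := by unfold Spec_calc_py; infer_instance

-- ===== CLAIM (what is proved, stated in full; the proofs are below) =====
def Claim_equal_calc_py : Prop := ∀ (rooms : List Int) (ma : Int) (m : Int), Dom_calc_py rooms ma m → Spec_calc_py rooms ma m (calc_py rooms ma m)

-- ===== LEMMAS AND PROOFS =====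

-- One idle month of A's loop.
theorem calcA_idle_step (ma mm c : Int) (rest : List Int) (month s : Int)
    (hma : month + 1 < ma) (hsc : s < c) :
    calcA_loop ma mm (c :: rest) month s = calcA_loop ma mm (c :: rest) (month + 1) (s + mm) := by
  rw [calcA_loop]
  split_ifs <;> first | rfl | omega

-- Skipping: n+1 idle months at once equal n+1 single idle steps of A's loop.
theorem calcA_skip (ma mm c : Int) (rest : List Int) (n : Nat) :
    ∀ month s : Int, month + ((n : Int) + 1) ≤ ma - 1 →
    (∀ k : Int, 0 ≤ k → k < (n : Int) + 1 → s + k * mm < c) →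
    calcA_loop ma mm (c :: rest) month s =
      calcA_loop ma mm (c :: rest) (month + ((n : Int) + 1)) (s + ((n : Int) + 1) * mm) := by
  induction n with
  | zero =>
    intro month s hb hlt
    rw [calcA_idle_step ma mm c rest month s (by omega) (by have := hlt 0 le_rfl (by norm_num); linarith)]
    norm_num
  | succ n ih =>
    intro month s hb hlt
    rw [calcA_idle_step ma mm c rest month s (by push_cast at hb ⊢; omega)
          (by have := hlt 0 le_rfl (by positivity); linarith)]
    rw [ih (month + 1) (s + mm) (by push_cast at hb ⊢; omega)
          (fun k hk0 hk => by
            have := hlt (k + 1) (by omega) (by push_cast at hk ⊢; omega)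
            linarith [this])]
    congr 1
    · push_cast; ring
    · push_cast; ring

-- Exhaustion: if the room is never affordable, A idles through all remaining months.
theorem calcA_exhaust (ma mm c : Int) (rest : List Int) :
    ∀ month s : Int, month < ma →
    (∀ k : Int, 0 ≤ k → k ≤ ma - month - 1 → s + k * mm < c) →
    calcA_loop ma mm (c :: rest) month s = (c :: rest, s + (ma - month - 1) * mm) := by
  intro month s
  generalize hfuel : (ma - month).toNat = fuel
  induction fuel generalizing month s with
  | zero => intro hma _; omega
  | succ fuel ih =>
    intro hma hlt
    by_cases hone : month + 1 = ma
    · have h0 := hlt 0 le_rfl (by omega)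
      rw [calcA_loop, if_pos hma, if_neg (by linarith : ¬ s ≥ c),
          if_neg (by omega : ¬ month + 1 ≠ ma)]
      have hz : ma - month - 1 = 0 := by omega
      rw [hz]; norm_num
    · rw [calcA_idle_step ma mm c rest month s (by omega)
          (by have := hlt 0 le_rfl (by omega); linarith)]
      rw [ih (month + 1) (s + mm) (by omega) (by omega)
          (fun k hk0 hk => by
            have := hlt (k + 1) (by omega) (by omega)
            linarith)]
      congr 1
      ring

-- A's loop stops immediately once month ≥ ma.
theorem calcA_stop (ma mm : Int) (x : List Int) (month s : Int) (h : ¬ month < ma) :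
    calcA_loop ma mm x month s = (x, s) := by
  cases x with
  | nil => rw [calcA_loop]
  | cons c rest => rw [calcA_loop.eq_def]; simp [h]

-- Main correspondence between the two loops.
theorem loop_main (ma mm : Int) (x : List Int) :
    ∀ month s bought : Int, month < ma →
    calcB_loop ma mm x month s bought =
      (bought + ((x.length : Int) - ((calcA_loop ma mm x month s).1.length : Int)),
       (calcA_loop ma mm x month s).2) := by
  induction x with
  | nil => intro month s bought hma; simp [calcB_loop, calcA_loop]
  | cons c rest ih =>
    intro month s bought hma
    rw [calcB_loop]
    by_cases hsc : s < c
    · rw [if_pos hsc]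
      set rem := ma - month - 1 with hrem
      set t := PySem.Int.floordiv (c - s + mm - 1) mm with htdef
      by_cases hex : mm ≤ 0 ∨ t > rem
      · rw [if_pos hex]
        rw [calcA_exhaust ma mm c rest month s hma ?hlt]
        · rw [hrem]; simp
        case hlt =>
          intro k hk0 hk
          rcases hex with hm | htr
          · have : k * mm ≤ 0 := mul_nonpos_of_nonneg_of_nonpos hk0 hm
            linarith
          · -- mm ≤ 0 fails here, so 0 < mm
            by_cases hmm0 : mm ≤ 0
            · have : k * mm ≤ 0 := mul_nonpos_of_nonneg_of_nonpos hk0 hmm0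
              linarith
            have hmm : 0 < mm := by omega
            have hqt := (PySem.Int.floordiv_eq_iff_of_pos (a := c - s + mm - 1) hmm).mp htdef.symm
            -- k ≤ rem < t so k ≤ t - 1
            have hkt : k ≤ t - 1 := by omega
            have : k * mm ≤ (t - 1) * mm := mul_le_mul_of_nonneg_right hkt hmm.le
            have h2 : (t - 1) * mm = t * mm - mm := by ring
            linarith [hqt.1]
      · rw [if_neg hex]
        rw [not_or] at hex
        obtain ⟨hmm', htr⟩ := hex
        have hmm : 0 < mm := by omega
        have htr : t ≤ rem := by omega
        have hqt := (PySem.Int.floordiv_eq_iff_of_pos (a := c - s + mm - 1) hmm).mp htdef.symm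
        have hta : s + t * mm ≥ c := by
          have := hqt.2
          have h2 : (t + 1) * mm = t * mm + mm := by ring
          linarith
        have ht1 : 1 ≤ t := by
          by_contra h
          have : t * mm ≤ 0 * mm := mul_le_mul_of_nonneg_right (by omega) hmm.le
          simp at this
          linarith
        have hlt : ∀ k : Int, 0 ≤ k → k < t → s + k * mm < c := by
          intro k hk0 hk
          have hkt : k ≤ t - 1 := by omega
          have : k * mm ≤ (t - 1) * mm := mul_le_mul_of_nonneg_right hkt hmm.le
          have h2 : (t - 1) * mm = t * mm - mm := by ring
          linarith [hqt.1]
        obtain ⟨n, hn⟩ : ∃ n : Nat, t = (n : Int) + 1 := ⟨(t - 1).toNat, by omega⟩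
        have hskip := calcA_skip ma mm c rest n month s (by omega) (by rw [← hn]; exact hlt)
        rw [← hn] at hskip
        rw [hskip]
        have hbuy : calcA_loop ma mm (c :: rest) (month + t) (s + t * mm)
            = calcA_loop ma mm rest (month + t) (s + t * mm - c) := by
          rw [calcA_loop]
          split_ifs <;> first | rfl | omega
        rw [hbuy]
        rw [ih (month + t) (s + t * mm - c) (bought + 1) (by omega)]
        simp only [Prod.mk.injEq, List.length_cons]
        exact ⟨by push_cast; ring, trivial⟩
    · rw [if_neg hsc]
      have hbuy : calcA_loop ma mm (c :: rest) month s
          = calcA_loop ma mm rest month (s - c) := by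
        rw [calcA_loop]
        split_ifs <;> first | rfl | omega
      rw [hbuy]
      rw [ih month (s - c) (bought + 1) hma]
      simp only [Prod.mk.injEq, List.length_cons]
      exact ⟨by push_cast; ring, trivial⟩

-- ===== VERDICT (by name: the statement is the Claim_ definition above) =====
theorem calc_py_spec : Claim_equal_calc_py := by
  intro rooms ma m _
  unfold Spec_calc_py calc_py calc_py_alt
  dsimp only
  by_cases hma : ma ≤ 0
  · rw [if_pos hma, calcA_stop ma m rooms 0 m (by omega)]
    simp
  · rw [if_neg hma, loop_main ma m rooms 0 m 0 (by omega)]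
    simp
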